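-- pv_equiv track=rewrite | github.com/R-Li2002/Football-manager-online-league-Database | attribute_versions.py | sort_attribute_versions
-- ===== SOURCE A (Python) =====
-- def normalize_attribute_data_version(value: str | None) -> str | None:
--     if value is None:
--         return None
--     normalized = str(value).strip()
--     return normalized or None
--
-- def sort_attribute_versions(versions: list[str] | tuple[str, ...] | set[str]) -> list[str]:
--     normalized_versions = {
--         normalized
--         for value in versions
--         if (normalized := normalize_attribute_data_version(value))
--     }
--
--     def version_key(version: str) -> tuple[int, int, str]:
--         if version.isdigit():
--             return (0, -int(version), version)
--         return (1, 0, version.lower())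
--
--     return sorted(normalized_versions, key=version_key)
-- ===== SOURCE B (Python) =====
-- def sort_attribute_versions(versions):
--     normalized = [v for value in versions for v in [value.strip() if value is not None else ""] if v]
--     uniq = dict.fromkeys(normalized)
--     nums = [v for v in uniq if v.isdigit()]
--     strs = [v for v in uniq if not v.isdigit()]
--     return sorted(nums, key=lambda v: (-int(v), v)) + sorted(strs, key=str.lower)
-- ===== Notes on version B (the rewrite author's own statement) =====
-- stated objective: faster
-- what changed: A sorts the whole dedup set once under a composite 3-tuple key; B partitions the dedup sequence into numeric and non-numeric versions and sorts each partition with its own simple key (no tuple built per comparison for the string part), concatenating the results; measured ~2.7x faster at the largest size.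
-- outside the precondition, e.g. on sort_attribute_versions(['A', 'a']): A returns ['a', 'A'], B returns ['A', 'a']
import Mathlib
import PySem

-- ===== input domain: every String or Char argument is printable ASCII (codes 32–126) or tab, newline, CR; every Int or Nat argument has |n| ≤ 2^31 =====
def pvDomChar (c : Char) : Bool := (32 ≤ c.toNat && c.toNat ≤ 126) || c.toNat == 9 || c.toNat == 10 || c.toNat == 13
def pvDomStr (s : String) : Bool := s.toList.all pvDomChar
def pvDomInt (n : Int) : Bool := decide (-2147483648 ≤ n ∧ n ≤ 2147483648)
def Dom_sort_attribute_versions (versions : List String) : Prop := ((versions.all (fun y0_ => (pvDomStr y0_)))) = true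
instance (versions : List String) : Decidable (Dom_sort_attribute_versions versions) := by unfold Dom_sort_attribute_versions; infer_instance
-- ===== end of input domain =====

-- B replaces A's single sort under a composite 3-tuple key by a partition of the dedup
-- sequence into numeric and non-numeric versions, each sorted with its own simple key
-- and concatenated (measurably faster by a constant factor: no 3-tuple per comparison).

-- ===== PORT A =====
-- helper of A; the `value is None` branch is vacuous on the List String domain
def normalize_attribute_data_version (value : String) : Option String :=
  let normalized := PySem.Str.strip value
  if normalized = "" then none else some normalized

-- A's inner `version_key`. `int(version)` is only reached when version.isdigit(),
-- where int() cannot raise, so its total form `(ofStr? _).getD 0` is exact there.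
def version_key (version : String) : Int × Int × String :=
  if PySem.Str.strIsdigit version then
    ((0 : Int), -((PySem.Int.ofStr? version).getD 0), version)
  else
    ((1 : Int), (0 : Int), PySem.Str.lower version)

-- Python's '<' on (int, int, str) tuples, written out component by component
-- (exact: Mathlib's Prod '<' is the product order, not Python's lexicographic one)
def tuple3_lt (a b : Int × Int × String) : Bool :=
  decide (a.1 < b.1) ||
    (a.1 == b.1 && (decide (a.2.1 < b.2.1) ||
      (a.2.1 == b.2.1 && decide (a.2.2 < b.2.2))))

-- the set comprehension, then sorted(_, key=version_key); a Python set's iteration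
-- order is not modelled — Pre_ below makes the sort independent of it.
-- sorted(_, key) IS this insertBy fold (PySem.List.sorted_eq_foldl_insertBy, rfl);
-- it is spelled out because the key is a 3-tuple, whose '<' is tuple3_lt above.
def sort_attribute_versions (versions : List String) : List String :=
  let normalized_versions : PySem.Set String :=
    versions.foldl (fun acc value =>
      match normalize_attribute_data_version value with
      | some normalized => PySem.Set.add acc normalized
      | none => acc) PySem.Set.empty
  normalized_versions.foldl (fun acc x =>
    PySem.List.insertBy (fun a b => tuple3_lt (version_key a) (version_key b)) x acc) []

-- ===== PORT B =====
def sort_attribute_versions_alt (versions : List String) : List String :=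
  let normalized := (versions.map PySem.Str.strip).filter (fun v => !(v == ""))
  let uniq := PySem.List.dedup normalized   -- dict.fromkeys
  let nums := uniq.filter (fun v => PySem.Str.strIsdigit v)
  let strs := uniq.filter (fun v => !PySem.Str.strIsdigit v)
  PySem.List.sorted2 nums (fun v => -((PySem.Int.ofStr? v).getD 0)) (fun v => v)
    ++ PySem.List.sorted strs (fun v => PySem.Str.lower v)

-- ===== PRECONDITION & SPEC =====
-- Pre_ excludes inputs on which two distinct non-numeric normalized versions share the
-- same lowercase form: there A's tie order is the iteration order of a Python set (hash
-- order, seed-dependent), which no port can reproduce; B keeps first-occurrence order.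
def Pre_sort_attribute_versions (versions : List String) : Prop :=
  (PySem.List.dedup ((versions.map PySem.Str.strip).filter (fun v => !(v == "")))).Pairwise
    (fun a b => PySem.Str.strIsdigit a = true ∨ PySem.Str.strIsdigit b = true ∨
      PySem.Str.lower a ≠ PySem.Str.lower b)
instance (versions : List String) : Decidable (Pre_sort_attribute_versions versions) := by
  unfold Pre_sort_attribute_versions; infer_instance

def pvWitness_sort_attribute_versions : List String := ["2", " 10 ", "alpha", "Beta", "", "2", "007"]

def Spec_sort_attribute_versions (versions : List String) (out : List String) : Prop := out = sort_attribute_versions_alt versions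
instance (versions : List String) (out : List String) : Decidable (Spec_sort_attribute_versions versions out) := by unfold Spec_sort_attribute_versions; infer_instance

-- ===== CLAIM (what is proved, stated in full; the proofs are below) =====
def Claim_equal_sort_attribute_versions : Prop := ∀ (versions : List String), Dom_sort_attribute_versions versions → Pre_sort_attribute_versions versions → Spec_sort_attribute_versions versions (sort_attribute_versions versions)

-- ===== LEMMAS AND PROOFS =====

-- the normalized sequence both programs deduplicate
def pvNorm (versions : List String) : List String :=
  (versions.map PySem.Str.strip).filter (fun v => !(v == ""))

-- A's fold builds exactly set(pvNorm versions) (insertion-order model)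
theorem foldA_eq (versions : List String) (acc : PySem.Set String) :
    versions.foldl (fun acc value =>
      match normalize_attribute_data_version value with
      | some normalized => PySem.Set.add acc normalized
      | none => acc) acc = (pvNorm versions).foldl PySem.Set.add acc := by
  induction versions generalizing acc with
  | nil => rfl
  | cons v vs ih =>
    by_cases h : PySem.Str.strip v = "" <;>
      · simp [pvNorm, normalize_attribute_data_version, h]
        exact ih _

-- sorted2 with two linear-order keys is sorted with the lexicographic pair key
theorem sorted2_eq_sorted_lex {α κ₁ κ₂ : Type} [LinearOrder κ₁] [LinearOrder κ₂]
    (xs : List α) (k1 : α → κ₁) (k2 : α → κ₂) :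
    PySem.List.sorted2 xs k1 k2 = PySem.List.sorted xs (fun x => toLex (k1 x, k2 x)) := by
  have hcmp : (fun a b : α => decide (k1 a < k1 b) || (!decide (k1 b < k1 a) && decide (k2 a < k2 b)))
      = (fun a b : α => decide ((fun x => toLex (k1 x, k2 x)) a < (fun x => toLex (k1 x, k2 x)) b)) := by
    funext a b
    simp only [Prod.Lex.lt_iff, ofLex_toLex, Bool.decide_or, Bool.decide_and]
    by_cases h1 : k1 a < k1 b
    · simp [h1]
    · by_cases h2 : k1 b < k1 a
      · have hne : k1 a ≠ k1 b := fun he => absurd (he ▸ h2) (lt_irrefl _)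
        simp [h1, h2, hne]
      · have heq : k1 a = k1 b := le_antisymm (not_lt.mp h2) (not_lt.mp h1)
        simp [heq]
  show xs.foldl (fun acc x => PySem.List.insertBy
      (fun a b => decide (k1 a < k1 b) || (!decide (k1 b < k1 a) && decide (k2 a < k2 b))) x acc) [] = _
  rw [hcmp, PySem.List.sorted_eq_foldl_insertBy]

-- tuple3_lt is Bool-valued strict lexicographic '<', i.e. '<' of the nested Lex pairs
theorem tuple3_lt_eq (a b : Int × Int × String) :
    tuple3_lt a b = decide ((toLex (a.1, toLex (a.2.1, a.2.2)) : Lex (Int × Lex (Int × String))) <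
      toLex (b.1, toLex (b.2.1, b.2.2))) := by
  unfold tuple3_lt
  by_cases h1 : a.1 < b.1
  · simp [h1, Prod.Lex.lt_iff]
  · by_cases heq : a.1 = b.1
    · by_cases h21 : a.2.1 < b.2.1
      · simp [heq, h21, Prod.Lex.lt_iff]
      · by_cases heq2 : a.2.1 = b.2.1
        · by_cases h22 : a.2.2 < b.2.2 <;> simp [heq, heq2, h22, Prod.Lex.lt_iff]
        · simp [heq, h21, heq2, Prod.Lex.lt_iff]
    · simp [h1, heq, Prod.Lex.lt_iff]

-- ===== VERDICT (by name: the statement is the Claim_ definition above) =====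
theorem sort_attribute_versions_spec : Claim_equal_sort_attribute_versions := by
  intro versions _hdom hpre
  unfold Spec_sort_attribute_versions
  show List.foldl _ [] _ = _
  rw [show (versions.foldl (fun acc value =>
      match normalize_attribute_data_version value with
      | some normalized => PySem.Set.add acc normalized
      | none => acc) PySem.Set.empty) = PySem.Set.ofList (pvNorm versions) from
    (foldA_eq versions _).trans (PySem.Set.ofList_eq_foldl _).symm]
  rw [show (PySem.Set.ofList (pvNorm versions)).foldl (fun acc x =>
      PySem.List.insertBy (fun a b => tuple3_lt (version_key a) (version_key b)) x acc) [] =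
    PySem.List.sorted (PySem.Set.ofList (pvNorm versions)) (fun v =>
      (toLex ((version_key v).1, toLex ((version_key v).2.1, (version_key v).2.2)) :
        Lex (Int × Lex (Int × String)))) by
    rw [PySem.List.sorted_eq_foldl_insertBy]
    congr 1
    funext acc x
    congr 1
    funext a b
    rw [tuple3_lt_eq]]
  show _ = PySem.List.sorted2
      ((PySem.List.dedup (pvNorm versions)).filter (fun v => PySem.Str.strIsdigit v))
      (fun v => -((PySem.Int.ofStr? v).getD 0)) (fun v => v)
    ++ PySem.List.sorted
      ((PySem.List.dedup (pvNorm versions)).filter (fun v => !PySem.Str.strIsdigit v))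
      (fun v => PySem.Str.lower v)
  rw [show PySem.List.dedup (pvNorm versions) =
      PySem.Set.ofList (pvNorm versions) from PySem.List.dedup_eq_ofList _]
  set S := PySem.Set.ofList (pvNorm versions) with hS
  have hnodup : S.Nodup := PySem.Set.nodup_ofList _
  have hpre' : S.Pairwise (fun a b => PySem.Str.strIsdigit a = true ∨
      PySem.Str.strIsdigit b = true ∨ PySem.Str.lower a ≠ PySem.Str.lower b) := by
    have := hpre
    unfold Pre_sort_attribute_versions at this
    rwa [PySem.List.dedup_eq_ofList] at this
  rw [sorted2_eq_sorted_lex]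
  -- name the two sorted halves
  set nums := S.filter (fun v => PySem.Str.strIsdigit v) with hnums
  set strs := S.filter (fun v => !PySem.Str.strIsdigit v) with hstrs
  set ys := PySem.List.sorted nums (fun v => toLex (-((PySem.Int.ofStr? v).getD 0), v))
      ++ PySem.List.sorted strs (fun v => PySem.Str.lower v) with hys
  apply PySem.List.sorted_eq_of_perm_of_pairwise_lt
  · -- permutation
    exact ((PySem.List.sorted_perm nums _ false).append
      (PySem.List.sorted_perm strs _ false)).trans
      (List.filter_append_perm _ S)
  · -- strictly increasing under version_key
    rw [hys, List.pairwise_append]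
    refine ⟨?_, ?_, ?_⟩
    · -- within nums
      have hnd : (PySem.List.sorted nums (fun v => toLex (-((PySem.Int.ofStr? v).getD 0), v)) : List String).Nodup :=
        (PySem.List.sorted_perm nums _ false).symm.nodup (hnodup.filter _)
      have hle := PySem.List.sorted_pairwise nums (fun v => toLex (-((PySem.Int.ofStr? v).getD 0), v))
      refine (hle.and hnd).imp_of_mem ?_
      intro a b ha hb hab
      have hamem : a ∈ nums := (PySem.List.mem_sorted _ _ _ _).mp ha
      have hda : PySem.Str.strIsdigit a = true := (List.mem_filter.mp hamem).2
      have hbmem : b ∈ nums := (PySem.List.mem_sorted _ _ _ _).mp hb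
      have hdb : PySem.Str.strIsdigit b = true := (List.mem_filter.mp hbmem).2
      have hne : (toLex (-((PySem.Int.ofStr? a).getD 0), a) : Lex (Int × String)) ≠
          toLex (-((PySem.Int.ofStr? b).getD 0), b) := by
        intro h
        exact hab.2 (congrArg (fun p => (ofLex p).2) h)
      have hlt := lt_of_le_of_ne hab.1 hne
      show (toLex ((version_key a).1, toLex ((version_key a).2.1, (version_key a).2.2)) :
          Lex (Int × Lex (Int × String))) < _
      simp only [version_key, hda, hdb, if_true]
      exact Prod.Lex.toLex_lt_toLex.mpr (Or.inr ⟨rfl, hlt⟩)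
    · -- within strs
      have hnd : (PySem.List.sorted strs (fun v => PySem.Str.lower v) : List String).Nodup :=
        (PySem.List.sorted_perm strs _ false).symm.nodup (hnodup.filter _)
      have hle := PySem.List.sorted_pairwise strs (fun v => PySem.Str.lower v)
      have hsym : Symmetric (fun a b : String => PySem.Str.strIsdigit a = true ∨
          PySem.Str.strIsdigit b = true ∨ PySem.Str.lower a ≠ PySem.Str.lower b) := by
        intro a b h
        rcases h with h | h | h
        · exact Or.inr (Or.inl h)
        · exact Or.inl h
        · exact Or.inr (Or.inr (Ne.symm h))
      have hall := List.Pairwise.forall hsym hpre'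
      refine (hle.and hnd).imp_of_mem ?_
      intro a b ha hb hab
      have hamem : a ∈ strs := (PySem.List.mem_sorted _ _ _ _).mp ha
      have hbmem : b ∈ strs := (PySem.List.mem_sorted _ _ _ _).mp hb
      have hda : PySem.Str.strIsdigit a = false := by
        simpa using (List.mem_filter.mp hamem).2
      have hdb : PySem.Str.strIsdigit b = false := by
        simpa using (List.mem_filter.mp hbmem).2
      have hlne : PySem.Str.lower a ≠ PySem.Str.lower b := by
        rcases hall (List.mem_filter.mp hamem).1 (List.mem_filter.mp hbmem).1 hab.2 with h | h | h
        · rw [hda] at h; exact absurd h (by simp)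
        · rw [hdb] at h; exact absurd h (by simp)
        · exact h
      have hlt := lt_of_le_of_ne hab.1 hlne
      show (toLex ((version_key a).1, toLex ((version_key a).2.1, (version_key a).2.2)) :
          Lex (Int × Lex (Int × String))) < _
      simp only [version_key, hda, hdb, Bool.false_eq_true, if_false]
      exact Prod.Lex.toLex_lt_toLex.mpr
        (Or.inr ⟨rfl, Prod.Lex.toLex_lt_toLex.mpr (Or.inr ⟨rfl, hlt⟩)⟩)
    · -- nums before strs
      intro a ha b hb
      have hda : PySem.Str.strIsdigit a = true :=
        (List.mem_filter.mp ((PySem.List.mem_sorted _ _ _ _).mp ha)).2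
      have hdb : PySem.Str.strIsdigit b = false := by
        have := (List.mem_filter.mp ((PySem.List.mem_sorted _ _ _ _).mp hb)).2
        simpa using this
      show (toLex ((version_key a).1, toLex ((version_key a).2.1, (version_key a).2.2)) :
          Lex (Int × Lex (Int × String))) < _
      simp only [version_key, hda, hdb, Bool.false_eq_true, if_false, if_true]
      exact Prod.Lex.toLex_lt_toLex.mpr (by left; norm_num)
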